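-- pv_equiv track=rewrite | github.com/dyssl/jieduizuoye | AutoPlayForShisanshui/CommonCardsType.py | FindDuizi
-- ===== SOURCE A (Python) =====
-- def GetList_count(Cardlist=[]):
--     list_count = [0, 0, 0, 0, 0, 0, 0, 0, 0, 0, 0, 0, 0, 0, 0]
--     for item in Cardlist:
--         number = item[0]
--         list_count[number] = list_count[number] + 1
--     return list_count
--
-- def FindDuizi(Cardlist=[]):
--     Duizi_list = []  # 最后要返回的列表
--     Cardlist.sort()
--     list_count = GetList_count(Cardlist)  # 存储每种牌出现的次数
--     for i in range(len(list_count)):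
--         temp_list = []  # 临时列表，存储一个对子
--         if (list_count[i] == 2):  # 如果牌面为i的卡牌有2张，就找到一个对子
--             for item in Cardlist:
--                 if (item[0] == i):
--                     temp_list.append(item)
--             Duizi_list.append(temp_list)
--         elif (list_count[i] == 3):  # 如果牌面为i的卡牌有3张，就找到三个对子
--             temp_list = []
--             for item in Cardlist:
--                 index = Cardlist.index(item)
--                 if (item[0] == i):
--                     temp_list.append(Cardlist[index])
--                     temp_list.append(Cardlist[index + 1])
--                     Duizi_list.append(temp_list)
--                     temp_list = []
--                     temp_list.append(Cardlist[index])
--                     temp_list.append(Cardlist[index + 2])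
--                     Duizi_list.append(temp_list)
--                     temp_list = []
--                     temp_list.append(Cardlist[index + 1])
--                     temp_list.append(Cardlist[index + 2])
--                     Duizi_list.append(temp_list)
--                     temp_list = []
--                     break
--         elif (list_count[i] == 4):  # 如果牌面为i的卡牌有3张，就找到六个对子
--             for item in Cardlist:
--                 index = Cardlist.index(item)
--                 if (item[0] == i):
--                     temp_list.append(Cardlist[index])
--                     temp_list.append(Cardlist[index + 1])
--                     Duizi_list.append(temp_list)
--                     temp_list = []
--                     temp_list.append(Cardlist[index])
--                     temp_list.append(Cardlist[index + 2])
--                     Duizi_list.append(temp_list)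
--                     temp_list = []
--                     temp_list.append(Cardlist[index])
--                     temp_list.append(Cardlist[index + 3])
--                     Duizi_list.append(temp_list)
--                     temp_list = []
--                     temp_list.append(Cardlist[index + 1])
--                     temp_list.append(Cardlist[index + 2])
--                     Duizi_list.append(temp_list)
--                     temp_list = []
--                     temp_list.append(Cardlist[index + 1])
--                     temp_list.append(Cardlist[index + 3])
--                     Duizi_list.append(temp_list)
--                     temp_list = []
--                     temp_list.append(Cardlist[index + 2])
--                     temp_list.append(Cardlist[index + 3])
--                     Duizi_list.append(temp_list)
--                     temp_list = []
--                     break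
--     return Duizi_list
-- ===== SOURCE B (Python) =====
-- def FindDuizi(Cardlist=[]):
--     Cardlist.sort()
--     Duizi_list = []
--     for face in range(15):
--         cards = [card for card in Cardlist if card[0] == face]
--         if 2 <= len(cards) <= 4:
--             for j in range(len(cards)):
--                 for k in range(j + 1, len(cards)):
--                     Duizi_list.append([cards[j], cards[k]])
--     return Duizi_list
-- ===== Notes on version B (the rewrite author's own statement) =====
-- stated objective: simpler
-- what changed: B replaces A's 15-slot count array plus three hardcoded per-count branches (with .index arithmetic to unroll the 3 or 6 pairs) by a uniform per-face filter and one generic j<k double loop emitting all combinations, guarded by 2<=count<=4.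
-- outside the precondition, e.g. on FindDuizi([(-1, 0), (14, 1)]): A returns [[(14, 1)]], B returns []
import Mathlib
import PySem

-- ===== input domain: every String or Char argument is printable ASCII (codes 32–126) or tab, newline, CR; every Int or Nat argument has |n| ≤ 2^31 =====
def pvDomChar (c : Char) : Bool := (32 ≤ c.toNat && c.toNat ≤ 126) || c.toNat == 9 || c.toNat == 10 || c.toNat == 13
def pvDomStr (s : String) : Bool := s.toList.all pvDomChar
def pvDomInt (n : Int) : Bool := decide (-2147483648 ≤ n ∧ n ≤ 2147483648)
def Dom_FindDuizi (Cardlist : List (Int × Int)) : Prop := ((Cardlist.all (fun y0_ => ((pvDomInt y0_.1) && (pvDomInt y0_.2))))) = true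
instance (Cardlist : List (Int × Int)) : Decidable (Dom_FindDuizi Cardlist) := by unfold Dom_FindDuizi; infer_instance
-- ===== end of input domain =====

-- B replaces A's count array + hardcoded per-count pair unrolling by a per-face filter and a
-- generic j<k combination double loop (objective: simpler). Both A and B sort Cardlist in place
-- (same mutation); the equivalence proved here is about the return value.


-- ===== PORT A =====
-- GetList_count: 15 zeros, then list_count[item[0]] += 1 for each card (Python indexing via pySetD/pyGetD)
def GetList_count (Cardlist : List (Int × Int)) : List Int :=
  Cardlist.foldl
    (fun list_count item =>
      PySem.List.pySetD list_count item.1 (PySem.List.pyGetD list_count item.1 0 + 1))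
    [0, 0, 0, 0, 0, 0, 0, 0, 0, 0, 0, 0, 0, 0, 0]

-- the count==3 inner 'for item in Cardlist: index = Cardlist.index(item); if item[0]==i: …; break'
def pvScan3 (S : List (Int × Int)) (i : Int) (acc : List (List (Int × Int))) :
    List (Int × Int) → List (List (Int × Int))
  | [] => acc
  | item :: rest =>
      let index : Nat := (PySem.List.index? S item).getD 0   -- item ∈ S, so index? is some
      if item.1 = i then
        let c0 := PySem.List.pyGetD S (index : Int) (0, 0)
        let c1 := PySem.List.pyGetD S ((index : Int) + 1) (0, 0)
        let c2 := PySem.List.pyGetD S ((index : Int) + 2) (0, 0)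
        acc ++ [[c0, c1], [c0, c2], [c1, c2]]
      else pvScan3 S i acc rest

-- the count==4 inner loop (six pairs, then break)
def pvScan4 (S : List (Int × Int)) (i : Int) (acc : List (List (Int × Int))) :
    List (Int × Int) → List (List (Int × Int))
  | [] => acc
  | item :: rest =>
      let index : Nat := (PySem.List.index? S item).getD 0
      if item.1 = i then
        let c0 := PySem.List.pyGetD S (index : Int) (0, 0)
        let c1 := PySem.List.pyGetD S ((index : Int) + 1) (0, 0)
        let c2 := PySem.List.pyGetD S ((index : Int) + 2) (0, 0)
        let c3 := PySem.List.pyGetD S ((index : Int) + 3) (0, 0)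
        acc ++ [[c0, c1], [c0, c2], [c0, c3], [c1, c2], [c1, c3], [c2, c3]]
      else pvScan4 S i acc rest

-- one iteration of A's 'for i in range(len(list_count))' loop
def pvStepA (S : List (Int × Int)) (lc : List Int) (acc : List (List (Int × Int))) (i : Int) :
    List (List (Int × Int)) :=
  if PySem.List.pyGetD lc i 0 = 2 then
    acc ++ [S.foldl (fun temp item => if item.1 = i then temp ++ [item] else temp) []]
  else if PySem.List.pyGetD lc i 0 = 3 then pvScan3 S i acc S
  else if PySem.List.pyGetD lc i 0 = 4 then pvScan4 S i acc S
  else acc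

def FindDuizi (Cardlist : List (Int × Int)) : List (List (Int × Int)) :=
  let S := PySem.List.sorted2 Cardlist Prod.fst Prod.snd   -- Cardlist.sort(): lexicographic on the pair
  let list_count := GetList_count S
  (PySem.List.pyRange 0 (list_count.length : Int) 1).foldl (pvStepA S list_count) []

-- ===== PORT B =====
-- one iteration of B's 'for face in range(15)' loop
def pvStepB (S : List (Int × Int)) (acc : List (List (Int × Int))) (face : Int) :
    List (List (Int × Int)) :=
  let cards := S.filter (fun card => card.1 == face)
  if 2 ≤ cards.length ∧ cards.length ≤ 4 then
    (PySem.List.pyRange 0 (cards.length : Int) 1).foldl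
      (fun acc2 j =>
        (PySem.List.pyRange (j + 1) (cards.length : Int) 1).foldl
          (fun acc3 k =>
            acc3 ++ [[PySem.List.pyGetD cards j (0, 0), PySem.List.pyGetD cards k (0, 0)]])
          acc2)
      acc
  else acc

def FindDuizi_alt (Cardlist : List (Int × Int)) : List (List (Int × Int)) :=
  let S := PySem.List.sorted2 Cardlist Prod.fst Prod.snd
  (PySem.List.pyRange 0 15 1).foldl (pvStepB S) []

-- ===== PRECONDITION & SPEC =====
-- Pre_ restricts to the natural card domain: every face value in 0..14 (the 15 slots of A's count
-- array). Outside it A raises IndexError for a face ≥ 15 or ≤ -16, and for a face in -15..-1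
-- Python's negative-index wraparound makes A miscount that card into slots 0..14, so A can return
-- values (e.g. a singleton "pair") that B does not match; see the cite in claim.json.
def Pre_FindDuizi (Cardlist : List (Int × Int)) : Prop :=
  ∀ c ∈ Cardlist, 0 ≤ c.1 ∧ c.1 ≤ 14
instance (Cardlist : List (Int × Int)) : Decidable (Pre_FindDuizi Cardlist) := by
  unfold Pre_FindDuizi; infer_instance

def pvWitness_FindDuizi : (List (Int × Int)) := [(3, 0), (3, 1), (7, 2)]

def Spec_FindDuizi (Cardlist : List (Int × Int)) (out : List (List (Int × Int))) : Prop := out = FindDuizi_alt Cardlist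
instance (Cardlist : List (Int × Int)) (out : List (List (Int × Int))) : Decidable (Spec_FindDuizi Cardlist out) := by unfold Spec_FindDuizi; infer_instance

-- ===== CLAIM (what is proved, stated in full; the proofs are below) =====
def Claim_equal_FindDuizi : Prop := ∀ (Cardlist : List (Int × Int)), Dom_FindDuizi Cardlist → Pre_FindDuizi Cardlist → Spec_FindDuizi Cardlist (FindDuizi Cardlist)

-- ===== LEMMAS AND PROOFS =====

-- sorted2 with the two projection keys is Python's tuple sort, i.e. sorting by the lex key
theorem pv_before_eq : (fun (a b : Int × Int) => decide (a.1 < b.1) || !decide (b.1 < a.1) && decide (a.2 < b.2))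
    = (fun a b => decide (toLex a < toLex b)) := by
  funext a b
  have h : (toLex a < toLex b) ↔ (a.1 < b.1 ∨ (a.1 = b.1 ∧ a.2 < b.2)) := Prod.Lex.lt_iff
  by_cases h1 : a.1 < b.1 <;> by_cases h2 : b.1 < a.1 <;> by_cases h3 : a.2 < b.2 <;>
    simp [h1, h2, h3, h] <;> omega

theorem pv_sorted2_eq (xs : List (Int × Int)) :
    PySem.List.sorted2 xs Prod.fst Prod.snd
      = PySem.List.sorted xs (fun x => toLex x) := by
  rw [PySem.List.sorted_eq_foldl_insertBy]
  show List.foldl (fun acc x => PySem.List.insertBy (fun a b => decide (a.1 < b.1) || !decide (b.1 < a.1) && decide (a.2 < b.2)) x acc) [] xs = _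
  rw [pv_before_eq]

theorem pv_sorted2_pairwise_fst (xs : List (Int × Int)) :
    (PySem.List.sorted2 xs Prod.fst Prod.snd).Pairwise (fun a b => a.1 ≤ b.1) := by
  rw [pv_sorted2_eq]
  refine (PySem.List.sorted_pairwise xs (fun x => toLex x)).imp ?_
  intro a b hab
  rcases (Prod.Lex.le_iff ..).mp hab with h | h
  · exact le_of_lt h
  · exact le_of_eq h.1

-- A's count array holds, at each face 0..14, the number of cards with that face
theorem pv_count_aux (S : List (Int × Int)) : ∀ (lc : List Int), lc.length = 15 →
    (∀ c ∈ S, 0 ≤ c.1 ∧ c.1 ≤ 14) → ∀ i : Int, 0 ≤ i → i < 15 →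
    PySem.List.pyGetD
      (S.foldl (fun list_count item =>
        PySem.List.pySetD list_count item.1 (PySem.List.pyGetD list_count item.1 0 + 1)) lc) i 0
      = PySem.List.pyGetD lc i 0 + (S.countP (fun c => c.1 == i) : Int) := by
  induction S with
  | nil => intro lc _ _ i _ _; simp
  | cons x t ih =>
    intro lc hlen hpre i h0 h15
    have hx := hpre x (by simp)
    rw [List.foldl_cons, ih _ (by rw [PySem.List.length_pySetD]; exact hlen)
        (fun c hc => hpre c (List.mem_cons_of_mem _ hc)) i h0 h15]
    rw [List.countP_cons]
    rw [PySem.List.pySetD_of_nonneg _ _ hx.1]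
    rw [PySem.List.pyGetD_eq_getElem _ _ h0 (by rw [List.length_set]; omega)]
    rw [PySem.List.pyGetD_eq_getElem _ _ h0 (by omega)]
    rw [PySem.List.pyGetD_eq_getElem _ _ hx.1 (by omega)]
    by_cases hxi : x.1 = i
    · have : i.toNat = x.1.toNat := by omega
      rw [List.getElem_set]
      simp [this, hxi]
      omega
    · rw [List.getElem_set]
      simp [hxi]
      intro h
      omega

theorem pv_count_len (S : List (Int × Int)) : (GetList_count S).length = 15 := by
  unfold GetList_count
  generalize h : ([0,0,0,0,0,0,0,0,0,0,0,0,0,0,0] : List Int) = lc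
  have hlen : lc.length = 15 := by rw [← h]; rfl
  clear h
  induction S generalizing lc with
  | nil => simpa
  | cons x t ih => rw [List.foldl_cons]; exact ih _ (by rw [PySem.List.length_pySetD]; exact hlen)

theorem pv_count_spec (S : List (Int × Int)) (hpre : ∀ c ∈ S, 0 ≤ c.1 ∧ c.1 ≤ 14)
    (i : Int) (h0 : 0 ≤ i) (h15 : i < 15) :
    PySem.List.pyGetD (GetList_count S) i 0 = ((S.filter (fun c => c.1 == i)).length : Int) := by
  unfold GetList_count
  rw [pv_count_aux S _ rfl hpre i h0 h15, ← List.countP_eq_length_filter]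
  have : PySem.List.pyGetD ([0,0,0,0,0,0,0,0,0,0,0,0,0,0,0] : List Int) i 0 = 0 := by
    rw [PySem.List.pyGetD_eq_getElem _ _ h0 (by simp; omega)]
    interval_cases i <;> rfl
  rw [this]; ring

-- in a fst-sorted list the cards of one face are contiguous: the list splits around its filter
theorem pv_filter_infix (i : Int) : ∀ (S : List (Int × Int)),
    S.Pairwise (fun a b => a.1 ≤ b.1) →
    ∃ P Q, S = P ++ S.filter (fun c => c.1 == i) ++ Q ∧
      (∀ p ∈ P, ¬ p.1 = i) ∧ (∀ q ∈ Q, ¬ q.1 = i) := by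
  intro S
  induction S with
  | nil => intro _; exact ⟨[], [], by simp, by simp, by simp⟩
  | cons h t ih =>
    intro hp
    rw [List.pairwise_cons] at hp
    obtain ⟨P', Q', ht, hP', hQ'⟩ := ih hp.2
    by_cases hh : h.1 = i
    · rcases hF : t.filter (fun c => c.1 == i) with _ | ⟨f, F'⟩
      · refine ⟨[], t, ?_, by simp, ?_⟩
        · simp only [List.filter_cons, hh]
          simp [hF]
        · intro q hq hqi
          have : q ∈ t.filter (fun c => c.1 == i) := List.mem_filter.mpr ⟨hq, by simp [hqi]⟩
          rw [hF] at this; simp at this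
      · have hf : f ∈ t.filter (fun c => c.1 == i) := by rw [hF]; simp
        have hfi : f.1 = i := by simpa using (List.mem_filter.mp hf).2
        have hPempty : P' = [] := by
          rcases P' with _ | ⟨p, P''⟩
          · rfl
          · exfalso
            have hpi : ¬ p.1 = i := hP' p (by simp)
            have hple : i ≤ p.1 := by
              have := hp.1 p (by rw [ht]; simp)
              omega
            have hpf : p.1 ≤ f.1 := by
              have hpair := hp.2
              rw [ht, hF] at hpair
              have h3 := List.pairwise_append.mp hpair
              have h4 := List.pairwise_append.mp h3.1
              exact h4.2.2 p (List.mem_cons_self ..) f (List.mem_cons_self ..)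
            omega
        subst hPempty
        simp only [List.nil_append] at ht
        refine ⟨[], Q', ?_, by simp, hQ'⟩
        have hb : ((h.1 == i) : Bool) = true := by simp [hh]
        simp only [List.filter_cons, hb, if_true, List.nil_append, List.cons_append]
        exact congrArg (h :: ·) ht
    · refine ⟨h :: P', Q', ?_, ?_, hQ'⟩
      · simp only [List.filter_cons]
        have : ((h.1 == i) : Bool) = false := by simp [hh]
        rw [this]
        simpa using ht
      · intro p hp'
        rcases List.mem_cons.mp hp' with rfl | hmem
        · exact hh
        · exact hP' p hmem

-- indexing into the middle block of an append
theorem pv_getD_mid (P R : List (Int × Int)) (k : Nat) (d : Int × Int) :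
    (P ++ R).getD (P.length + k) d = R.getD k d := by
  rw [List.getD_append_right P R d _ (by omega)]
  simp

theorem pv_pyGetD_mid (P R : List (Int × Int)) (k : Nat) (d : Int × Int) :
    PySem.List.pyGetD (P ++ R) ((P.length : Int) + (k : Int)) d = R.getD k d := by
  have : ((P.length : Int) + (k : Int)) = ((P.length + k : Nat) : Int) := by push_cast; ring
  rw [this, PySem.List.pyGetD_natCast, pv_getD_mid]

-- A's break-loops skip every card of a different face
theorem pv_scan3_skip (S : List (Int × Int)) (i : Int) (acc : List (List (Int × Int))) :
    ∀ (P rest : List (Int × Int)), (∀ p ∈ P, ¬ p.1 = i) →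
    pvScan3 S i acc (P ++ rest) = pvScan3 S i acc rest := by
  intro P
  induction P with
  | nil => intro rest _; rfl
  | cons p t ih =>
    intro rest hP
    rw [List.cons_append]
    show pvScan3 S i acc (p :: (t ++ rest)) = _
    rw [pvScan3]
    simp only [hP p (List.mem_cons_self ..), if_false]
    exact ih rest (fun q hq => hP q (List.mem_cons_of_mem _ hq))

theorem pv_scan4_skip (S : List (Int × Int)) (i : Int) (acc : List (List (Int × Int))) :
    ∀ (P rest : List (Int × Int)), (∀ p ∈ P, ¬ p.1 = i) →
    pvScan4 S i acc (P ++ rest) = pvScan4 S i acc rest := by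
  intro P
  induction P with
  | nil => intro rest _; rfl
  | cons p t ih =>
    intro rest hP
    rw [List.cons_append]
    rw [pvScan4]
    simp only [hP p (List.mem_cons_self ..), if_false]
    exact ih rest (fun q hq => hP q (List.mem_cons_of_mem _ hq))

-- A's break-loops, at the first card of face i, emit the pairs read off at offsets 0..2 / 0..3
theorem pv_scan3_hit (P Q : List (Int × Int)) (a b c : Int × Int) (i : Int)
    (acc : List (List (Int × Int))) (rest : List (Int × Int))
    (hai : a.1 = i) (haP : a ∉ P) :
    pvScan3 (P ++ a :: b :: c :: Q) i acc (a :: rest) = acc ++ [[a, b], [a, c], [b, c]] := by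
  have hidx : PySem.List.index? (P ++ a :: b :: c :: Q) a = some P.length :=
    (PySem.List.index?_eq_some_iff ..).mpr ⟨P, b :: c :: Q, rfl, rfl, haP⟩
  rw [pvScan3]
  simp only [hidx, Option.getD_some, hai, if_true]
  have e0 : PySem.List.pyGetD (P ++ a :: b :: c :: Q) ((P.length : Nat) : Int) (0, 0) = a := by
    rw [PySem.List.pyGetD_natCast, List.getD_append_right P _ _ _ (by omega)]
    simp
  have e1 : PySem.List.pyGetD (P ++ a :: b :: c :: Q) (((P.length : Nat) : Int) + 1) (0, 0) = b := by
    have h1 : ((P.length : Nat) : Int) + 1 = ((P.length : Int) + ((1 : Nat) : Int)) := by push_cast; ring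
    rw [h1, pv_pyGetD_mid]; rfl
  have e2 : PySem.List.pyGetD (P ++ a :: b :: c :: Q) (((P.length : Nat) : Int) + 2) (0, 0) = c := by
    have h2 : ((P.length : Nat) : Int) + 2 = ((P.length : Int) + ((2 : Nat) : Int)) := by push_cast; ring
    rw [h2, pv_pyGetD_mid]; rfl
  rw [e0, e1, e2]

theorem pv_scan4_hit (P Q : List (Int × Int)) (a b c d : Int × Int) (i : Int)
    (acc : List (List (Int × Int))) (rest : List (Int × Int))
    (hai : a.1 = i) (haP : a ∉ P) :
    pvScan4 (P ++ a :: b :: c :: d :: Q) i acc (a :: rest)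
      = acc ++ [[a, b], [a, c], [a, d], [b, c], [b, d], [c, d]] := by
  have hidx : PySem.List.index? (P ++ a :: b :: c :: d :: Q) a = some P.length :=
    (PySem.List.index?_eq_some_iff ..).mpr ⟨P, b :: c :: d :: Q, rfl, rfl, haP⟩
  rw [pvScan4]
  simp only [hidx, Option.getD_some, hai, if_true]
  have e0 : PySem.List.pyGetD (P ++ a :: b :: c :: d :: Q) ((P.length : Nat) : Int) (0, 0) = a := by
    rw [PySem.List.pyGetD_natCast, List.getD_append_right P _ _ _ (by omega)]
    simp
  have e1 : PySem.List.pyGetD (P ++ a :: b :: c :: d :: Q) (((P.length : Nat) : Int) + 1) (0, 0) = b := by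
    have h1 : ((P.length : Nat) : Int) + 1 = ((P.length : Int) + ((1 : Nat) : Int)) := by push_cast; ring
    rw [h1, pv_pyGetD_mid]; rfl
  have e2 : PySem.List.pyGetD (P ++ a :: b :: c :: d :: Q) (((P.length : Nat) : Int) + 2) (0, 0) = c := by
    have h2 : ((P.length : Nat) : Int) + 2 = ((P.length : Int) + ((2 : Nat) : Int)) := by push_cast; ring
    rw [h2, pv_pyGetD_mid]; rfl
  have e3 : PySem.List.pyGetD (P ++ a :: b :: c :: d :: Q) (((P.length : Nat) : Int) + 3) (0, 0) = d := by
    have h3 : ((P.length : Nat) : Int) + 3 = ((P.length : Int) + ((3 : Nat) : Int)) := by push_cast; ring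
    rw [h3, pv_pyGetD_mid]; rfl
  rw [e0, e1, e2, e3]

-- B's generic combination loop, evaluated on a face group of each admissible size
theorem pv_stepB_two (S : List (Int × Int)) (acc : List (List (Int × Int))) (i : Int)
    (a b : Int × Int) (hF : S.filter (fun c => c.1 == i) = [a, b]) :
    pvStepB S acc i = acc ++ [[a, b]] := by
  unfold pvStepB
  rw [hF]
  norm_num [PySem.List.pyRange_one, List.range_succ, PySem.List.pyGetD_ofNat', List.flatten,
    Function.comp, (show ((2:Int).toNat = 2) from rfl), (show ((1:Int).toNat = 1) from rfl)]

theorem pv_stepB_three (S : List (Int × Int)) (acc : List (List (Int × Int))) (i : Int)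
    (a b c : Int × Int) (hF : S.filter (fun x => x.1 == i) = [a, b, c]) :
    pvStepB S acc i = acc ++ [[a, b], [a, c], [b, c]] := by
  unfold pvStepB
  rw [hF]
  norm_num [PySem.List.pyRange_one, List.range_succ, PySem.List.pyGetD_ofNat', List.flatten,
    Function.comp, (show ((3:Int).toNat = 3) from rfl), (show ((2:Int).toNat = 2) from rfl),
    (show ((1:Int).toNat = 1) from rfl)]

theorem pv_stepB_four (S : List (Int × Int)) (acc : List (List (Int × Int))) (i : Int)
    (a b c d : Int × Int) (hF : S.filter (fun x => x.1 == i) = [a, b, c, d]) :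
    pvStepB S acc i = acc ++ [[a, b], [a, c], [a, d], [b, c], [b, d], [c, d]] := by
  unfold pvStepB
  rw [hF]
  norm_num [PySem.List.pyRange_one, List.range_succ, PySem.List.pyGetD_ofNat', List.flatten,
    Function.comp, (show ((4:Int).toNat = 4) from rfl), (show ((3:Int).toNat = 3) from rfl),
    (show ((2:Int).toNat = 2) from rfl), (show ((1:Int).toNat = 1) from rfl)]

-- the heart: on a sorted list, A's loop body for face i equals B's loop body for face i
theorem pv_step_eq (S : List (Int × Int))
    (hsort : S.Pairwise (fun a b => a.1 ≤ b.1))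
    (hpre : ∀ c ∈ S, 0 ≤ c.1 ∧ c.1 ≤ 14)
    (acc : List (List (Int × Int))) (i : Int) (h0 : 0 ≤ i) (h15 : i < 15) :
    pvStepA S (GetList_count S) acc i = pvStepB S acc i := by
  obtain ⟨P, Q, hS, hP, hQ⟩ := pv_filter_infix i S hsort
  have hcnt := pv_count_spec S hpre i h0 h15
  unfold pvStepA
  rw [hcnt]
  rcases hF : S.filter (fun c => c.1 == i) with _ | ⟨a, _ | ⟨b, _ | ⟨c, _ | ⟨d, _ | ⟨e, rest⟩⟩⟩⟩⟩ <;>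
    rw [hF] at hS
  · -- no card of face i
    rw [hF]
    norm_num
    unfold pvStepB
    rw [hF]
    norm_num
  · -- one card
    rw [hF]
    norm_num
    unfold pvStepB
    rw [hF]
    norm_num
  · -- two cards: A appends the filter scan as one pair, B the single combination
    rw [hF]
    norm_num
    rw [pv_stepB_two S acc i a b hF]
    rw [PySem.List.foldl_append_ite_eq_filter (fun x => x.1 = i) S []]
    have hfe : S.filter (fun x => decide (x.1 = i)) = S.filter (fun c => c.1 == i) :=
      List.filter_congr (fun x _ => rfl)
    rw [hfe, hF]
    simp
  · -- three cards: A's break-loop reads offsets 0..2, B lists the 3 combinations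
    rw [hF]
    norm_num
    have ha : a.1 = i := by
      have hmem : a ∈ S.filter (fun c => c.1 == i) := by rw [hF]; simp
      simpa using (List.mem_filter.mp hmem).2
    have haP : a ∉ P := fun hmem => hP a hmem ha
    have hS' : S = P ++ a :: b :: c :: Q := by rw [hS]; simp
    rw [pv_stepB_three S acc i a b c hF, hS']
    rw [pv_scan3_skip _ _ _ P _ hP]
    exact pv_scan3_hit P Q a b c i acc _ ha haP
  · -- four cards
    rw [hF]
    norm_num
    have ha : a.1 = i := by
      have hmem : a ∈ S.filter (fun x => x.1 == i) := by rw [hF]; simp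
      simpa using (List.mem_filter.mp hmem).2
    have haP : a ∉ P := fun hmem => hP a hmem ha
    have hS' : S = P ++ a :: b :: c :: d :: Q := by rw [hS]; simp
    rw [pv_stepB_four S acc i a b c d hF, hS']
    rw [pv_scan4_skip _ _ _ P _ hP]
    exact pv_scan4_hit P Q a b c d i acc _ ha haP
  · -- five or more cards: both emit nothing
    rw [hF]
    have hlen : ((a :: b :: c :: d :: e :: rest).length : Int) = (rest.length : Int) + 5 := by
      simp; ring
    rw [hlen]
    rw [if_neg (by omega), if_neg (by omega), if_neg (by omega)]
    unfold pvStepB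
    rw [hF]
    rw [if_neg (by simp)]

theorem pv_main (L : List (Int × Int)) (hpre : Pre_FindDuizi L) :
    FindDuizi L = FindDuizi_alt L := by
  unfold FindDuizi FindDuizi_alt
  show (PySem.List.pyRange 0 (((GetList_count (PySem.List.sorted2 L Prod.fst Prod.snd)).length : Nat) : Int) 1).foldl
        (pvStepA (PySem.List.sorted2 L Prod.fst Prod.snd) (GetList_count (PySem.List.sorted2 L Prod.fst Prod.snd))) []
      = (PySem.List.pyRange 0 15 1).foldl (pvStepB (PySem.List.sorted2 L Prod.fst Prod.snd)) []
  rw [pv_count_len]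
  rw [show (((15 : Nat)) : Int) = 15 from rfl]
  apply PySem.List.foldl_congr_mem
  intro acc i hi
  obtain ⟨hi0, hi15⟩ := PySem.List.mem_pyRange_one.mp hi
  exact pv_step_eq (PySem.List.sorted2 L Prod.fst Prod.snd)
    (pv_sorted2_pairwise_fst L)
    (fun c hc => hpre c ((PySem.List.sorted2_perm L Prod.fst Prod.snd false).subset hc))
    acc i hi0 hi15

-- ===== VERDICT (by name: the statement is the Claim_ definition above) =====
theorem FindDuizi_spec : Claim_equal_FindDuizi := by
  intro Cardlist _ hpre
  unfold Spec_FindDuizi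
  exact pv_main Cardlist hpre
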